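-- pv_equiv track=rewrite | github.com/xangelcoded/alertify | app.py | _build_location_chunks
-- ===== SOURCE A (Python) =====
-- from typing import Dict, Any, List, Tuple, Optional
--
-- def _tokenize_norm(t_norm: str) -> List[str]:
--     return [x for x in t_norm.split() if x]
--
-- _LOCATION_STOPWORDS = {
--     "sa", "ng", "nasa", "dito", "diyan", "doon", "bandang", "tapat", "malapit",
--     "near", "beside", "tabi", "katabi", "papunta", "papuntang", "around", "area",
--     "brgy", "barangay", "lipa", "city", "po", "pls", "please", "urgent", "asap",
--     "help", "tulong", "saklolo", "rescue", "need"
-- }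
--
-- def _clean_location_tokens(t_norm: str) -> List[str]:
--     toks = _tokenize_norm(t_norm)
--     return [x for x in toks if x and x not in _LOCATION_STOPWORDS]
--
-- def _build_location_chunks(t_norm: str) -> List[str]:
--     toks = _clean_location_tokens(t_norm)
--     chunks: List[str] = []
--
--     for n in (4, 3, 2, 1):
--         for i in range(0, max(0, len(toks) - n + 1)):
--             c = " ".join(toks[i:i + n]).strip()
--             if len(c) >= 4:
--                 chunks.append(c)
--
--     for n in (3, 2, 1):
--         for i in range(0, max(0, len(toks) - n + 1)):
--             c = "".join(toks[i:i + n]).strip()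
--             if len(c) >= 5:
--                 chunks.append(c)
--
--     seen = set()
--     out: List[str] = []
--     for c in chunks:
--         if c not in seen:
--             seen.add(c)
--             out.append(c)
--     return out
-- ===== SOURCE B (Python) =====
-- from typing import Dict, Any, List, Tuple, Optional
--
-- _LOCATION_STOPWORDS = {
--     "sa", "ng", "nasa", "dito", "diyan", "doon", "bandang", "tapat", "malapit",
--     "near", "beside", "tabi", "katabi", "papunta", "papuntang", "around", "area",
--     "brgy", "barangay", "lipa", "city", "po", "pls", "please", "urgent", "asap",
--     "help", "tulong", "saklolo", "rescue", "need"
-- }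
--
-- def _grams(ts: List[str], n: int, sep: str) -> List[str]:
--     """All n-grams of ts, joined by sep, by structural recursion on the token list."""
--     if len(ts) < n:
--         return []
--     return [sep.join(ts[:n]).strip()] + _grams(ts[1:], n, sep)
--
-- def _build_location_chunks(t_norm: str) -> List[str]:
--     toks = [x for x in t_norm.split() if x and x not in _LOCATION_STOPWORDS]
--     chunks = [c for n in (4, 3, 2, 1) for c in _grams(toks, n, " ") if len(c) >= 4]
--     chunks += [c for n in (3, 2, 1) for c in _grams(toks, n, "") if len(c) >= 5]
--     return list(dict.fromkeys(chunks))
-- ===== Notes on version B (the rewrite author's own statement) =====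
-- stated objective: alternative
-- what changed: Generates n-grams by a recursive helper over token-list suffixes (instead of index-range loops with slicing), flattens them through filtered comprehensions, and deduplicates with dict.fromkeys instead of a hand-written seen-set loop.
import Mathlib
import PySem

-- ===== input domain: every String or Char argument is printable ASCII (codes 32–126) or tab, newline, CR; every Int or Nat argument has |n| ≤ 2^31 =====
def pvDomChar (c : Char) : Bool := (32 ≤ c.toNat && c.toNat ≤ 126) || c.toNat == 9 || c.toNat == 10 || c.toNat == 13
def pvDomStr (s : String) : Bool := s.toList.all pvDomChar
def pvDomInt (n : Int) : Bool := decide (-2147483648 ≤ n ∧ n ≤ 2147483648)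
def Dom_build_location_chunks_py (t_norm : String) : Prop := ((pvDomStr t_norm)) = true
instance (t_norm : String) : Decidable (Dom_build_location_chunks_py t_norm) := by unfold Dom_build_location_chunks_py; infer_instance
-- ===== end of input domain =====

-- B replaces A's index-range loops + seen-set dedup pass by a recursive n-gram helper over
-- token-list suffixes, filtered comprehensions, and dict.fromkeys; objective: alternative.

-- _LOCATION_STOPWORDS (a Python set literal of distinct strings; membership test only)
def pvStop : List String :=
  ["sa", "ng", "nasa", "dito", "diyan", "doon", "bandang", "tapat", "malapit",
   "near", "beside", "tabi", "katabi", "papunta", "papuntang", "around", "area",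
   "brgy", "barangay", "lipa", "city", "po", "pls", "please", "urgent", "asap",
   "help", "tulong", "saklolo", "rescue", "need"]

-- ===== PORT A =====
def build_location_chunks_py (t_norm : String) : List String :=
  -- toks = _clean_location_tokens(t_norm): filter of _tokenize_norm
  let toks0 := (PySem.Str.split₀ t_norm).filter (fun x => x ≠ "")
  let toks := toks0.filter (fun x => x ≠ "" ∧ x ∉ pvStop)
  let chunks := [(4 : Int), 3, 2, 1].foldl (fun chunks n =>
    (PySem.List.pyRange 0 (max 0 ((toks.length : Int) - n + 1)) 1).foldl (fun chunks i =>
      let c := PySem.Str.strip (PySem.Str.join " " (PySem.List.slice toks (some i) (some (i + n))))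
      if PySem.Str.len c ≥ 4 then chunks ++ [c] else chunks) chunks) []
  let chunks := [(3 : Int), 2, 1].foldl (fun chunks n =>
    (PySem.List.pyRange 0 (max 0 ((toks.length : Int) - n + 1)) 1).foldl (fun chunks i =>
      let c := PySem.Str.strip (PySem.Str.join "" (PySem.List.slice toks (some i) (some (i + n))))
      if PySem.Str.len c ≥ 5 then chunks ++ [c] else chunks) chunks) chunks
  let st := chunks.foldl (fun (st : PySem.Set String × List String) c =>
    if ¬ PySem.Set.contains st.1 c then (PySem.Set.add st.1 c, st.2 ++ [c]) else st)
    (PySem.Set.empty, [])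
  st.2

-- ===== PORT B =====
-- _grams: structural recursion on the token list (Python's `grams(ts[1:], n, sep)`);
-- the `| []` branch is unreachable at the call sites (n ≥ 1 there).
def pvGrams (ts : List String) (n : Nat) (sep : String) : List String :=
  if ts.length < n then []
  else
    match ts with
    | [] => []
    | _ :: rest => PySem.Str.strip (PySem.Str.join sep (ts.take n)) :: pvGrams rest n sep

def build_location_chunks_py_alt (t_norm : String) : List String :=
  let toks := (PySem.Str.split₀ t_norm).filter (fun x => x ≠ "" ∧ x ∉ pvStop)
  let chunks := [4, 3, 2, 1].flatMap (fun n =>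
    (pvGrams toks n " ").filter (fun c => PySem.Str.len c ≥ 4))
  let chunks := chunks ++ [3, 2, 1].flatMap (fun n =>
    (pvGrams toks n "").filter (fun c => PySem.Str.len c ≥ 5))
  PySem.List.dedup chunks

-- ===== PRECONDITION & SPEC =====
def Spec_build_location_chunks_py (t_norm : String) (out : List String) : Prop := out = build_location_chunks_py_alt t_norm
instance (t_norm : String) (out : List String) : Decidable (Spec_build_location_chunks_py t_norm out) := by unfold Spec_build_location_chunks_py; infer_instance

-- ===== CLAIM (what is proved, stated in full; the proofs are below) =====
def Claim_equal_build_location_chunks_py : Prop := ∀ (t_norm : String), Dom_build_location_chunks_py t_norm → Spec_build_location_chunks_py t_norm (build_location_chunks_py t_norm)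

-- ===== LEMMAS AND PROOFS =====

-- the two token computations agree
lemma pv_toks_eq (t : String) :
    ((PySem.Str.split₀ t).filter (fun x => decide (x ≠ ""))).filter
        (fun x => decide (x ≠ "" ∧ x ∉ pvStop))
    = (PySem.Str.split₀ t).filter (fun x => decide (x ≠ "" ∧ x ∉ pvStop)) := by
  rw [List.filter_filter]
  apply List.filter_congr
  intro x _
  by_cases h1 : x = "" <;> by_cases h2 : x ∈ pvStop <;> simp [h1, h2]

-- the candidate at index k of A's range loop is the k-th entry of B's recursive gram list
lemma pv_map_range_eq_grams (ts : List String) (sep : String) (n : Nat) (hn : 1 ≤ n) :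
    (List.range (ts.length + 1 - n)).map
      (fun k => PySem.Str.strip (PySem.Str.join sep ((ts.drop k).take n)))
    = pvGrams ts n sep := by
  induction ts with
  | nil =>
    rw [pvGrams, if_pos (by simpa using hn)]
    have h0 : ([] : List String).length + 1 - n = 0 := by simp; omega
    rw [h0, List.range_zero, List.map_nil]
  | cons x rest ih =>
    by_cases h : rest.length + 1 < n
    · have hl : (x :: rest).length < n := by simpa using h
      rw [pvGrams, if_pos hl]
      have h0 : (x :: rest).length + 1 - n = 0 := by simp only [List.length_cons]; omega
      rw [h0, List.range_zero, List.map_nil]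
    · have hl : ¬ (x :: rest).length < n := by simp only [List.length_cons]; omega
      rw [pvGrams, if_neg hl]
      have h1 : (x :: rest).length + 1 - n = (rest.length + 1 - n) + 1 := by
        simp only [List.length_cons]; omega
      rw [h1, List.range_succ_eq_map, List.map_cons, List.map_map]
      -- head chunks agree definitionally; the tail is exactly ih (drop (k+1) (x::rest) = drop k rest)
      congr 1

-- A's inner index loop, for one n, produces B's filtered gram list
lemma pv_block (toks : List String) (sep : String) (m n : Int) (hn : 1 ≤ n)
    (acc : List String) :
    (PySem.List.pyRange 0 (max 0 ((toks.length : Int) - n + 1)) 1).foldl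
      (fun acc i =>
        if PySem.Str.len (PySem.Str.strip (PySem.Str.join sep
            (PySem.List.slice toks (some i) (some (i + n))))) ≥ m then
          acc ++ [PySem.Str.strip (PySem.Str.join sep
            (PySem.List.slice toks (some i) (some (i + n))))]
        else acc) acc
    = acc ++ (pvGrams toks n.toNat sep).filter (fun c => decide (PySem.Str.len c ≥ m)) := by
  rw [PySem.List.foldl_append_ite
    (p := fun i => PySem.Str.len (PySem.Str.strip (PySem.Str.join sep
      (PySem.List.slice toks (some i) (some (i + n))))) ≥ m)
    (f := fun i => PySem.Str.strip (PySem.Str.join sep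
      (PySem.List.slice toks (some i) (some (i + n)))))]
  congr 1
  have hmax : max 0 ((toks.length : Int) - n + 1)
      = ((toks.length + 1 - n.toNat : Nat) : Int) := by omega
  have hcast : n = ((n.toNat : Nat) : Int) := by omega
  have hx : ∀ k : Nat,
      PySem.List.slice toks (some ((k : Nat) : Int)) (some (((k : Nat) : Int) + n))
      = (toks.drop k).take n.toNat := by
    intro k
    conv_lhs => rw [hcast]
    rw [PySem.List.slice_natCast_add]
  rw [hmax, PySem.List.pyRange_zero_nat,
    ← pv_map_range_eq_grams toks sep n.toNat (by omega),
    List.filter_map, List.filter_map, List.map_map]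
  have hQ : (List.range (toks.length + 1 - n.toNat)).filter
        ((fun i => decide (PySem.Str.len (PySem.Str.strip (PySem.Str.join sep
          (PySem.List.slice toks (some i) (some (i + n))))) ≥ m)) ∘ (fun k : Nat => (k : Int)))
      = (List.range (toks.length + 1 - n.toNat)).filter
        ((fun c => decide (PySem.Str.len c ≥ m)) ∘
          (fun k => PySem.Str.strip (PySem.Str.join sep ((toks.drop k).take n.toNat)))) := by
    apply List.filter_congr
    intro k _
    simp only [Function.comp_apply, hx k]
  rw [hQ]
  apply List.map_congr_left
  intro k _
  simp only [Function.comp_apply, hx k]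

-- A's seen-set dedup loop with equal components computes Set.update in both components
lemma pv_dedup_fold (chunks : List String) (s : List String) :
    chunks.foldl (fun (st : PySem.Set String × List String) c =>
      if ¬ PySem.Set.contains st.1 c then (PySem.Set.add st.1 c, st.2 ++ [c]) else st)
      (s, s)
    = (PySem.Set.update s chunks, PySem.Set.update s chunks) := by
  induction chunks generalizing s with
  | nil => simp [PySem.Set.update]
  | cons c cs ih =>
    rw [List.foldl_cons, PySem.Set.update_cons]
    by_cases h : c ∈ s
    · rw [if_neg (by simp [h]), PySem.Set.add_of_mem h]
      exact ih s
    · rw [if_pos (by simp [h]), PySem.Set.add_of_not_mem h]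
      exact ih (s ++ [c])

-- ===== VERDICT (by name: the statement is the Claim_ definition above) =====
theorem build_location_chunks_py_spec : Claim_equal_build_location_chunks_py := by
  intro t _
  show build_location_chunks_py t = build_location_chunks_py_alt t
  simp only [build_location_chunks_py, build_location_chunks_py_alt]
  rw [pv_toks_eq]
  simp only [List.foldl_cons, List.foldl_nil, List.flatMap_cons, List.flatMap_nil,
    List.append_nil]
  rw [pv_block _ " " 4 4 (by norm_num), pv_block _ " " 4 3 (by norm_num),
    pv_block _ " " 4 2 (by norm_num), pv_block _ " " 4 1 (by norm_num),
    pv_block _ "" 5 3 (by norm_num), pv_block _ "" 5 2 (by norm_num),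
    pv_block _ "" 5 1 (by norm_num)]
  simp only [PySem.Set.empty]
  rw [pv_dedup_fold]
  simp [PySem.List.dedup_eq_ofList, ← PySem.Set.update_nil_left, List.append_assoc]
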